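-- pv_equiv track=rewrite | github.com/AshlynPowell/arctopsyche_population_scripts | pairwise_alignment_coords.py | get_poly_coords
-- ===== SOURCE A (Python) =====
-- def get_poly_coords(table, seq1, seq2):
-- 	"""
-- 	Description: Calculate the coordinates of polygons based on indel positions (the grey boxes in the end figure)
-- 	Inputs: table (list of lists of strings) - table of indel data with columns: allele (with insert), start position, indel length
-- 			seq1 (string) - first sequence in the alignment
-- 			seq2 (string) - second sequence in the alignment
-- 	Return: coords (list of lists of strings) - table of coordinates of polygons with columns: top_left, top_right, bottom_left, bottom_right
-- 	"""
-- 	if table == []: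
-- 	  return [["0",str(len(seq1)),"0",str(len(seq2))]]
--
-- 	coords = []
--
-- 	prev_top = 0
-- 	prev_bottom = 0
-- 	prev_length = 0
--
-- 	offset = 0
--
-- 	# Loop over each row (i.e. each indel) in the table and add coodinates of each box
-- 	for row in table:
-- 		allele = row[0]
-- 		position = int(row[1])
-- 		length = int(row[2])
--
-- 		if allele == "1":
-- 			top = position - offset
-- 			bottom = position
--
-- 		else:
-- 			top = position
-- 			bottom = position + offset
--
-- 		new_row = [str(prev_top), str(top), str(prev_bottom), str(bottom)]
-- 		coords.append(new_row)
--
-- 		if allele == "1":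
-- 			offset -= length
-- 			top += length
--
-- 		else:
-- 			offset += length
-- 			bottom += length
--
-- 		prev_top = top
-- 		prev_bottom = bottom
-- 		prev_length = length
--
-- 	last_row = [str(top), str(len(seq1.replace("-",""))), str(bottom), str(len(seq2.replace("-","")))]
-- 	coords.append(last_row)
--
-- 	return coords
-- ===== SOURCE B (Python) =====
-- def get_poly_coords(table, seq1, seq2):
--     if table == []:
--         return [["0", str(len(seq1)), "0", str(len(seq2))]]
--     # prefix array: cumulative signed offset entering each row
--     offs = [0]
--     for row in table:
--         offs.append(offs[-1] - int(row[2]) if row[0] == "1" else offs[-1] + int(row[2]))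
--
--     def edges(row, off):
--         allele, position, length = row[0], int(row[1]), int(row[2])
--         if allele == "1":
--             top, bottom = position - off, position
--             return (top, bottom, top + length, bottom)
--         top, bottom = position, position + off
--         return (top, bottom, top, bottom + length)
--
--     E = [edges(row, off) for row, off in zip(table, offs)]
--     adjE = [(at, ab) for (_, _, at, ab) in E]
--     coords = [[str(pt), str(t), str(pb), str(b)]
--               for (pt, pb), (t, b, _, _) in zip([(0, 0)] + adjE, E)]
--     at, ab = adjE[-1]
--     coords.append([str(at), str(len(seq1.replace("-", ""))),
--                    str(ab), str(len(seq2.replace("-", "")))])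
--     return coords
-- ===== Notes on version B (the rewrite author's own statement) =====
-- stated objective: alternative
-- what changed: Replaces A's single stateful loop threading prev_top/prev_bottom/offset with a prefix array of cumulative signed offsets plus a per-row closed-form edge function, assembling each box by zipping every row's edges with the previous row's adjusted edges.
import Mathlib
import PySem

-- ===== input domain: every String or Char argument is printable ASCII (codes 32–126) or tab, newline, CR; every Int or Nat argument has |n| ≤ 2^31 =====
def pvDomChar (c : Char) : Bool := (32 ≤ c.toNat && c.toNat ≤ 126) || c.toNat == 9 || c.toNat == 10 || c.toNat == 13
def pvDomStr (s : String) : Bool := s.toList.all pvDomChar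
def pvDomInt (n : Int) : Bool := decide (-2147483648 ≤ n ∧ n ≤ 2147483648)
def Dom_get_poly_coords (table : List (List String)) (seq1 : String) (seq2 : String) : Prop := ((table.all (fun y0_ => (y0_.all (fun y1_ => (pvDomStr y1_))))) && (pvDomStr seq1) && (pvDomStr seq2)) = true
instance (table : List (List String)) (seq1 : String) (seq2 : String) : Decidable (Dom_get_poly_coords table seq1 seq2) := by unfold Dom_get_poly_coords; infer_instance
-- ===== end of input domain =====

-- B replaces A's stateful loop (threading prev_top/prev_bottom/offset) by a prefix-offset
-- array and a per-row closed-form edge function, zipping each row's edges with the previous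
-- row's adjusted edges (objective: alternative decomposition, same O(n) cost).


-- ===== PORT A =====
-- loop state: (coords, prev_top, prev_bottom, prev_length, offset); Python's `top`/`bottom`
-- after each iteration equal prev_top/prev_bottom (they are copied there), so the last_row
-- reads them from prev_top/prev_bottom.
def stepA (st : List (List String) × Int × Int × Int × Int) (row : List String) :
    List (List String) × Int × Int × Int × Int :=
  let allele := (PySem.List.pyGet? row 0).getD ""
  let position := (PySem.Int.ofStr? ((PySem.List.pyGet? row 1).getD "")).getD 0
  let length := (PySem.Int.ofStr? ((PySem.List.pyGet? row 2).getD "")).getD 0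
  let off := st.2.2.2.2
  let top := if allele == "1" then position - off else position
  let bottom := if allele == "1" then position else position + off
  let coords' := st.1 ++ [[PySem.Int.toStr st.2.1, PySem.Int.toStr top,
                           PySem.Int.toStr st.2.2.1, PySem.Int.toStr bottom]]
  let off' := if allele == "1" then off - length else off + length
  let top' := if allele == "1" then top + length else top
  let bottom' := if allele == "1" then bottom else bottom + length
  (coords', top', bottom', length, off')

def get_poly_coords (table : List (List String)) (seq1 : String) (seq2 : String) : List (List String) :=
  if table = [] then
    [["0", PySem.Int.toStr (PySem.Str.len seq1), "0", PySem.Int.toStr (PySem.Str.len seq2)]]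
  else
    let st := table.foldl stepA ([], 0, 0, 0, 0)
    st.1 ++ [[PySem.Int.toStr st.2.1,
              PySem.Int.toStr (PySem.Str.len (PySem.Str.replace seq1 "-" "")),
              PySem.Int.toStr st.2.2.1,
              PySem.Int.toStr (PySem.Str.len (PySem.Str.replace seq2 "-" ""))]]

-- ===== PORT B =====
-- prefix array of cumulative signed offsets entering each row
def offsB : List (List String) → Int → List Int
  | [], _ => []
  | row :: rest, off =>
    let d := (PySem.Int.ofStr? ((PySem.List.pyGet? row 2).getD "")).getD 0
    off :: offsB rest (if (PySem.List.pyGet? row 0).getD "" == "1" then off - d else off + d)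

-- closed-form edges of one row: (top, bottom, adjusted_top, adjusted_bottom)
def edgesB (row : List String) (off : Int) : Int × Int × Int × Int :=
  let allele := (PySem.List.pyGet? row 0).getD ""
  let position := (PySem.Int.ofStr? ((PySem.List.pyGet? row 1).getD "")).getD 0
  let length := (PySem.Int.ofStr? ((PySem.List.pyGet? row 2).getD "")).getD 0
  if allele == "1" then (position - off, position, position - off + length, position)
  else (position, position + off, position, position + off + length)

def mkRowB (p : Int × Int) (e : Int × Int × Int × Int) : List String :=
  [PySem.Int.toStr p.1, PySem.Int.toStr e.1, PySem.Int.toStr p.2, PySem.Int.toStr e.2.1]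

def get_poly_coords_alt (table : List (List String)) (seq1 : String) (seq2 : String) : List (List String) :=
  match table with
  | [] => [["0", PySem.Int.toStr (PySem.Str.len seq1), "0", PySem.Int.toStr (PySem.Str.len seq2)]]
  | _ =>
    let E := List.zipWith edgesB table (offsB table 0)
    let adjE := E.map (fun e => (e.2.2.1, e.2.2.2))
    let coords := List.zipWith mkRowB ((0, 0) :: adjE) E
    let last := adjE.getLast?.getD (0, 0)
    coords ++ [[PySem.Int.toStr last.1,
                PySem.Int.toStr (PySem.Str.len (PySem.Str.replace seq1 "-" "")),
                PySem.Int.toStr last.2,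
                PySem.Int.toStr (PySem.Str.len (PySem.Str.replace seq2 "-" ""))]]

-- ===== PRECONDITION & SPEC =====
-- Pre_ excludes exactly the inputs on which Python A raises: a row shorter than 3 entries
-- (IndexError) or whose position/length field is not int()-parseable (ValueError).
def Pre_get_poly_coords (table : List (List String)) (seq1 : String) (seq2 : String) : Prop :=
  ∀ row ∈ table, 3 ≤ row.length ∧
    (PySem.Int.ofStr? ((PySem.List.pyGet? row 1).getD "")).isSome = true ∧
    (PySem.Int.ofStr? ((PySem.List.pyGet? row 2).getD "")).isSome = true
instance (table : List (List String)) (seq1 : String) (seq2 : String) : Decidable (Pre_get_poly_coords table seq1 seq2) := by unfold Pre_get_poly_coords; infer_instance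

def pvWitness_get_poly_coords : List (List String) × String × String :=
  ([["1", "3", "2"], ["0", "5", "1"]], "AC-GT", "ACGGT")

def Spec_get_poly_coords (table : List (List String)) (seq1 : String) (seq2 : String) (out : List (List String)) : Prop := out = get_poly_coords_alt table seq1 seq2
instance (table : List (List String)) (seq1 : String) (seq2 : String) (out : List (List String)) : Decidable (Spec_get_poly_coords table seq1 seq2 out) := by unfold Spec_get_poly_coords; infer_instance

-- ===== CLAIM (what is proved, stated in full; the proofs are below) =====
def Claim_equal_get_poly_coords : Prop := ∀ (table : List (List String)) (seq1 : String) (seq2 : String), Dom_get_poly_coords table seq1 seq2 → Pre_get_poly_coords table seq1 seq2 → Spec_get_poly_coords table seq1 seq2 (get_poly_coords table seq1 seq2)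

-- ===== LEMMAS AND PROOFS =====

-- A's loop, run from any state, produces B's zipped rows and ends with B's last adjusted edges.
theorem loopA_eq (table : List (List String)) :
    ∀ (acc : List (List String)) (pt pb plen off : Int),
      (table.foldl stepA (acc, pt, pb, plen, off)).1 =
        acc ++ List.zipWith mkRowB
          ((pt, pb) :: (List.zipWith edgesB table (offsB table off)).map (fun e => (e.2.2.1, e.2.2.2)))
          (List.zipWith edgesB table (offsB table off)) ∧
      ((table.foldl stepA (acc, pt, pb, plen, off)).2.1,
       (table.foldl stepA (acc, pt, pb, plen, off)).2.2.1) =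
        ((List.zipWith edgesB table (offsB table off)).map
          (fun e => (e.2.2.1, e.2.2.2))).getLast?.getD (pt, pb) := by
  induction table with
  | nil => intro acc pt pb plen off; simp
  | cons row rest ih =>
    intro acc pt pb plen off
    by_cases h : ((PySem.List.pyGet? row 0).getD "" == "1") = true
    · simp only [List.foldl_cons, stepA, offsB, edgesB, h, if_true, List.zipWith_cons_cons,
        List.map_cons]
      obtain ⟨h1, h2⟩ := ih (acc ++ [[PySem.Int.toStr pt,
          PySem.Int.toStr ((PySem.Int.ofStr? ((PySem.List.pyGet? row 1).getD "")).getD 0 - off),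
          PySem.Int.toStr pb,
          PySem.Int.toStr ((PySem.Int.ofStr? ((PySem.List.pyGet? row 1).getD "")).getD 0)]])
        ((PySem.Int.ofStr? ((PySem.List.pyGet? row 1).getD "")).getD 0 - off +
          (PySem.Int.ofStr? ((PySem.List.pyGet? row 2).getD "")).getD 0)
        ((PySem.Int.ofStr? ((PySem.List.pyGet? row 1).getD "")).getD 0)
        ((PySem.Int.ofStr? ((PySem.List.pyGet? row 2).getD "")).getD 0)
        (off - (PySem.Int.ofStr? ((PySem.List.pyGet? row 2).getD "")).getD 0)
      constructor
      · rw [h1]; simp [mkRowB]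
      · rw [h2]
        cases hE : (List.zipWith edgesB rest
            (offsB rest (off - (PySem.Int.ofStr? ((PySem.List.pyGet? row 2).getD "")).getD 0))).map
            (fun e => (e.2.2.1, e.2.2.2)) with
        | nil => simp
        | cons x xs => simp [List.getLast?_cons]
    · rw [Bool.not_eq_true] at h
      simp only [List.foldl_cons, stepA, offsB, edgesB, h, Bool.false_eq_true, if_false,
        List.zipWith_cons_cons, List.map_cons]
      obtain ⟨h1, h2⟩ := ih (acc ++ [[PySem.Int.toStr pt,
          PySem.Int.toStr ((PySem.Int.ofStr? ((PySem.List.pyGet? row 1).getD "")).getD 0),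
          PySem.Int.toStr pb,
          PySem.Int.toStr ((PySem.Int.ofStr? ((PySem.List.pyGet? row 1).getD "")).getD 0 + off)]])
        ((PySem.Int.ofStr? ((PySem.List.pyGet? row 1).getD "")).getD 0)
        ((PySem.Int.ofStr? ((PySem.List.pyGet? row 1).getD "")).getD 0 + off +
          (PySem.Int.ofStr? ((PySem.List.pyGet? row 2).getD "")).getD 0)
        ((PySem.Int.ofStr? ((PySem.List.pyGet? row 2).getD "")).getD 0)
        (off + (PySem.Int.ofStr? ((PySem.List.pyGet? row 2).getD "")).getD 0)
      constructor
      · rw [h1]; simp [mkRowB]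
      · rw [h2]
        cases hE : (List.zipWith edgesB rest
            (offsB rest (off + (PySem.Int.ofStr? ((PySem.List.pyGet? row 2).getD "")).getD 0))).map
            (fun e => (e.2.2.1, e.2.2.2)) with
        | nil => simp
        | cons x xs => simp [List.getLast?_cons]

-- ===== VERDICT (by name: the statement is the Claim_ definition above) =====
theorem get_poly_coords_spec : Claim_equal_get_poly_coords := by
  intro table seq1 seq2 _ _
  unfold Spec_get_poly_coords
  cases table with
  | nil => rfl
  | cons row rest =>
    obtain ⟨h1, h2⟩ := loopA_eq (row :: rest) [] 0 0 0 0
    simp only [get_poly_coords, get_poly_coords_alt, if_neg (List.cons_ne_nil row rest)]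
    rw [h1]
    have := congrArg Prod.fst h2
    have := congrArg Prod.snd h2
    simp_all
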